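-- pv_equiv track=rewrite | github.com/AnatolyDomrachev/karantin | is28/maznicyn28/raraze96/lab6/Untitled14.py | counts
-- ===== SOURCE A (Python) =====
-- def counts(a):
--  b = [];
--  i = 0;
--  k = 0;
--  while i < len(a):
--   if (a[i] != " "):
--    k += 1;
--    i += 1;
--   else:
--    b.append(k);
--    k = 0;
--    i += 1;
--  b.append(k);
--  return b
-- ===== SOURCE B (Python) =====
-- def counts(a):
--     return [len(s) for s in a.split(" ")]
-- ===== Notes on version B (the rewrite author's own statement) =====
-- stated objective: idiomatic
-- what changed: Replaces the manual index/counter character loop with a library split on a single space followed by a map of len over the segments.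
import Mathlib
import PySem

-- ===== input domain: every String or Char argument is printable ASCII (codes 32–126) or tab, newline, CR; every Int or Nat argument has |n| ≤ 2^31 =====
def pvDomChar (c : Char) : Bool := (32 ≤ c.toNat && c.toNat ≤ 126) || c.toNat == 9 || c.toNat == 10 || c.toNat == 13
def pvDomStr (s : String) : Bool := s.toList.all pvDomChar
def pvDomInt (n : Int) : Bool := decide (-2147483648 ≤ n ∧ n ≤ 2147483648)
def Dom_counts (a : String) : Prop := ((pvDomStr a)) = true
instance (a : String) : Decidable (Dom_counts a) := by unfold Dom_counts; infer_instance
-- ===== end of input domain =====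

-- B replaces A's manual index/counter character loop by a split on " " followed by a map of len (idiomatic).

-- ===== PORT A =====
-- A's while loop advances one character per iteration, so it is the structural
-- recursion over the character list with the same state (k, b).
def countsLoop : List Char → Int → List Int → List Int
  | [], k, b => b ++ [k]
  | c :: cs, k, b => if c ≠ ' ' then countsLoop cs (k + 1) b else countsLoop cs 0 (b ++ [k])

def counts (a : String) : List Int := countsLoop a.toList 0 []

-- ===== PORT B =====
-- Source B: return [len(s) for s in a.split(" ")]
def counts_alt (a : String) : List Int :=
  (PySem.Chars.splitOn a.toList [' ']).map (fun p => (p.length : Int))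

-- ===== PRECONDITION & SPEC =====
def Spec_counts (a : String) (out : List Int) : Prop := out = counts_alt a
instance (a : String) (out : List Int) : Decidable (Spec_counts a out) := by unfold Spec_counts; infer_instance

-- ===== CLAIM (what is proved, stated in full; the proofs are below) =====
def Claim_equal_counts : Prop := ∀ (a : String), Dom_counts a → Spec_counts a (counts a)

-- ===== LEMMAS AND PROOFS =====

-- reference splitter: (first segment, remaining segments) of cs split on ' '
def splitParts : List Char → List Char × List (List Char)
  | [] => ([], [])
  | c :: cs =>
    if c = ' ' then ([], (splitParts cs).1 :: (splitParts cs).2)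
    else (c :: (splitParts cs).1, (splitParts cs).2)

theorem countsLoop_eq (cs : List Char) : ∀ (k : Int) (b : List Int),
    countsLoop cs k b =
      b ++ (k + ((splitParts cs).1.length : Int)) :: (splitParts cs).2.map (fun p => (p.length : Int)) := by
  induction cs with
  | nil => intro k b; simp [countsLoop, splitParts]
  | cons c cs ih =>
    intro k b
    by_cases h : c = ' '
    · simp [countsLoop, splitParts, h, ih]
    · simp [countsLoop, splitParts, h, ih]
      ring_nf

theorem go_eq (fuel : Nat) : ∀ (cs cur : List Char) (acc : List (List Char)),
    cs.length ≤ fuel →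
    PySem.Chars.splitOn.go [' '] fuel cs cur acc =
      acc.reverse ++ (cur.reverse ++ (splitParts cs).1) :: (splitParts cs).2 := by
  induction fuel with
  | zero =>
    intro cs cur acc h
    have : cs = [] := List.eq_nil_of_length_eq_zero (Nat.le_zero.mp h)
    subst this
    simp [PySem.Chars.splitOn.go, splitParts]
  | succ fuel ih =>
    intro cs cur acc h
    cases cs with
    | nil => simp [PySem.Chars.splitOn.go, splitParts]
    | cons c rest =>
      by_cases hc : c = ' '
      · have hp : [' '].isPrefixOf (c :: rest) = true := by simp [List.isPrefixOf, hc]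
        rw [PySem.Chars.splitOn.go]
        simp only [hp, if_true, List.length_cons, List.length_nil, Nat.zero_add, List.drop_succ_cons, List.drop_zero]
        rw [ih rest [] (cur.reverse :: acc) (by simpa using Nat.le_of_succ_le_succ h)]
        simp [splitParts, hc]
      · have hp : [' '].isPrefixOf (c :: rest) = false := by
          simp only [List.isPrefixOf, List.isPrefixOf_nil_left, Bool.and_true, beq_eq_false_iff_ne]
          exact fun h' => hc h'.symm
        rw [PySem.Chars.splitOn.go]
        simp only [hp, Bool.false_eq_true, if_false]
        rw [ih rest (c :: cur) acc (by simpa using Nat.le_of_succ_le_succ h)]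
        simp [splitParts, hc]

theorem splitOn_eq (cs : List Char) :
    PySem.Chars.splitOn cs [' '] = (splitParts cs).1 :: (splitParts cs).2 := by
  unfold PySem.Chars.splitOn
  rw [go_eq (cs.length + 1) cs [] [] (Nat.le_succ _)]
  simp

-- ===== VERDICT (by name: the statement is the Claim_ definition above) =====
theorem counts_spec : Claim_equal_counts := by
  intro a _
  unfold Spec_counts counts counts_alt
  rw [countsLoop_eq, splitOn_eq]
  simp
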